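-- pv_equiv track=rewrite | github.com/syncerpn/advent_of_code | 2022/day25.py | convert
-- ===== SOURCE A (Python) =====
-- def convert(s):
--     n = 0
--     for c in s:
--         n *= 5
--         if c == '-':
--             n += -1
--         elif c == '=':
--             n += -2
--         else:
--             n += int(c)
--
--     return n
-- ===== SOURCE B (Python) =====
-- def convert(s):
--     total = 0
--     weight = 1
--     for c in reversed(s):
--         total += (-1 if c == '-' else -2 if c == '=' else int(c)) * weight
--         weight *= 5
--     return total
-- ===== Notes on version B (the rewrite author's own statement) =====
-- stated objective: alternative
-- what changed: Replaces left-to-right Horner multiply-accumulate with a right-to-left scan that maintains an explicit place-value weight (1, 5, 25, ...) and sums digit*weight terms.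
import Mathlib
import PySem

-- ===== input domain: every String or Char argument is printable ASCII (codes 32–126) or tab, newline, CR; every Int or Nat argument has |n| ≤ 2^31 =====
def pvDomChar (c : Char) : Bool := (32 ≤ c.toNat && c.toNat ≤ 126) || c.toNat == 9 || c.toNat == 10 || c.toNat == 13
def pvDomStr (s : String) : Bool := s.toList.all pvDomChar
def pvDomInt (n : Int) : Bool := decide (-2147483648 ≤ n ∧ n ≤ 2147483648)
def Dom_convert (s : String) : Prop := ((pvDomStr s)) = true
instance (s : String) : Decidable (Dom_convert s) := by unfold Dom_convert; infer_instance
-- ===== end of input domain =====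

-- B replaces A's left-to-right Horner scheme with a right-to-left scan keeping an explicit place-value weight.

-- digit value of one SNAFU char: '-' → -1, '=' → -2, otherwise Python's int(c)
-- (shared helper; under Pre_ the else branch is a decimal digit, where ofStr? is exact)
def snafuVal (c : Char) : Int :=
  if c = '-' then -1
  else if c = '=' then -2
  else (PySem.Int.ofStr? (String.mk [c])).getD 0

-- ===== PORT A =====
def convert (s : String) : Int :=
  s.toList.foldl (fun n c => n * 5 + snafuVal c) 0

-- ===== PORT B =====
def convert_alt (s : String) : Int :=
  (s.toList.reverse.foldl
    (fun (p : Int × Int) c => (p.1 + snafuVal c * p.2, p.2 * 5)) (0, 1)).1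

-- ===== PRECONDITION & SPEC =====
-- Pre_ excludes strings containing a char that is neither a decimal digit nor '-' nor '=',
-- on which A's int(c) raises ValueError.
def Pre_convert (s : String) : Prop :=
  s.toList.all (fun c => c.isDigit || c == '-' || c == '=') = true
instance (s : String) : Decidable (Pre_convert s) := by unfold Pre_convert; infer_instance

def pvWitness_convert : String := "1="

def Spec_convert (s : String) (out : Int) : Prop := out = convert_alt s
instance (s : String) (out : Int) : Decidable (Spec_convert s out) := by unfold Spec_convert; infer_instance

-- ===== CLAIM (what is proved, stated in full; the proofs are below) =====
def Claim_equal_convert : Prop := ∀ (s : String), Dom_convert s → Pre_convert s → Spec_convert s (convert s)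

-- ===== LEMMAS AND PROOFS =====

def hornerF (l : List Char) (n : Int) : Int := l.foldl (fun n c => n * 5 + snafuVal c) n

lemma hornerF_append (l : List Char) (c : Char) (n : Int) :
    hornerF (l ++ [c]) n = hornerF l n * 5 + snafuVal c := by
  simp [hornerF, List.foldl_append]

lemma weightF (r : List Char) (t w : Int) :
    (r.foldl (fun (p : Int × Int) c => (p.1 + snafuVal c * p.2, p.2 * 5)) (t, w))
      = (t + w * hornerF r.reverse 0, w * 5 ^ r.length) := by
  induction r generalizing t w with
  | nil => simp [hornerF]
  | cons c r ih =>
      simp only [List.foldl_cons, List.reverse_cons, ih, hornerF_append, List.length_cons]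
      refine Prod.ext ?_ ?_ <;> simp <;> ring

theorem convert_spec : Claim_equal_convert := by
  intro s _ _
  unfold Spec_convert convert convert_alt
  rw [weightF]
  simp [hornerF]

-- ===== VERDICT (by name: the statement is the Claim_ definition above) =====
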